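-- pv_equiv track=rewrite | github.com/irishdevops/master_VIU_AI | 0.2_python_programming/Activity1/Díaz_Ireland_Práctica 1_HRRMNTSDPRGRMCN.py | notas_al_pie
-- ===== SOURCE A (Python) =====
-- def notas_al_pie(s:str) -> str:
--     validchar = list('!"#$%&\'()*+,-./:;<=>?@[\\]^_`{|}~')
--
--     def is_char_good()-> bool:
--         contador=0
--         stringchars=list(s)
--         for char in stringchars:
--             if  (char.isalpha() or char in validchar or char.isspace()):
--                 contador= contador
--             else:
--                 contador = contador + 1
--         return True if contador == 0 else False
--
--
--     def notas() -> str: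
--         notas_output=""
--         contador= 0
--         for char in s:
--             if char == "*":
--                 contador = contador + 1
--                 notas_output = notas_output + "(" + str(contador) + ")"
--             else: notas_output = notas_output + char
--         return notas_output
--
--
--
--
--
--     def output()-> str:
--         if(is_char_good() is False):
--             return "Message: not valid String as an input"
--         else: return notas()
--
--
--
--     return output()
-- ===== SOURCE B (Python) =====
-- VALID = '!"#$%&\'()*+,-./:;<=>?@[\\]^_`{|}~'
--
-- def notas_al_pie(s: str) -> str:
--     # single pass: validity flag + footnote counter + output pieces, joined at the end
--     valid = True
--     counter = 0
--     pieces = []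
--     for ch in s:
--         if not (ch.isalpha() or ch in VALID or ch.isspace()):
--             valid = False
--         if ch == '*':
--             counter += 1
--             pieces.append('(' + str(counter) + ')')
--         else:
--             pieces.append(ch)
--     if not valid:
--         return "Message: not valid String as an input"
--     return ''.join(pieces)
-- ===== Notes on version B (the rewrite author's own statement) =====
-- stated objective: simpler
-- what changed: B fuses A's three nested helper functions (a separate counting pass for validation, a separate transformation pass, and a dispatcher) into one loop over s carrying a valid flag, a footnote counter and a list of output pieces joined at the end, replacing repeated string concatenation with list-append + join.
import Mathlib
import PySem

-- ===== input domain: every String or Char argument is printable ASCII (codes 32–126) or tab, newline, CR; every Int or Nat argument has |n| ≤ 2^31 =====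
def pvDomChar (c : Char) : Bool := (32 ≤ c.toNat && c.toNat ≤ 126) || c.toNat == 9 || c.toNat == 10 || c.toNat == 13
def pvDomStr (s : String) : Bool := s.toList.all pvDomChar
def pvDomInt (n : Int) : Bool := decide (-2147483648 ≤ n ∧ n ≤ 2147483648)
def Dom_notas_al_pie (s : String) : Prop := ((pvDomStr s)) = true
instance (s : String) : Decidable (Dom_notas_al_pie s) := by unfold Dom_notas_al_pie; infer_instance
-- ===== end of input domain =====

-- B fuses A's separate validation and transformation passes into one loop carrying a valid
-- flag, a footnote counter and a list of output pieces joined at the end (objective: simpler).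

-- ===== PORT A =====
def pvValidchar : List Char := "!\"#$%&'()*+,-./:;<=>?@[\\]^_`{|}~".toList

def pvA_isCharGood (s : String) : Bool :=
  let contador : Int := s.toList.foldl
    (fun contador char =>
      if PySem.Chars.isalpha char || pvValidchar.contains char || PySem.Chars.isspace char
      then contador else contador + 1) 0
  contador == 0

def pvA_notas (s : String) : String :=
  let r : List Char × Int := s.toList.foldl
    (fun st char =>
      if char == '*'
      then (st.1 ++ ('(' :: PySem.Int.toChars (st.2 + 1) ++ [')']), st.2 + 1)
      else (st.1 ++ [char], st.2)) ([], 0)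
  String.ofList r.1

def notas_al_pie (s : String) : String :=
  if pvA_isCharGood s == false then "Message: not valid String as an input"
  else pvA_notas s

-- ===== PORT B =====
def pvB_valid : List Char := "!\"#$%&'()*+,-./:;<=>?@[\\]^_`{|}~".toList

def notas_al_pie_alt (s : String) : String :=
  let st : Bool × Int × List (List Char) := s.toList.foldl
    (fun st ch =>
      let valid := if !(PySem.Chars.isalpha ch || pvB_valid.contains ch || PySem.Chars.isspace ch)
                   then false else st.1
      if ch == '*'
      then (valid, st.2.1 + 1, st.2.2 ++ [('(' :: PySem.Int.toChars (st.2.1 + 1) ++ [')'])])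
      else (valid, st.2.1, st.2.2 ++ [[ch]]))
    (true, 0, [])
  if !st.1 then "Message: not valid String as an input"
  else String.ofList (PySem.Chars.join [] st.2.2)

-- ===== PRECONDITION & SPEC =====
def Spec_notas_al_pie (s : String) (out : String) : Prop := out = notas_al_pie_alt s
instance (s : String) (out : String) : Decidable (Spec_notas_al_pie s out) := by unfold Spec_notas_al_pie; infer_instance

-- ===== CLAIM (what is proved, stated in full; the proofs are below) =====
def Claim_equal_notas_al_pie : Prop := ∀ (s : String), Dom_notas_al_pie s → Spec_notas_al_pie s (notas_al_pie s)

-- ===== LEMMAS AND PROOFS =====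

/-- the per-char validity test both programs apply -/
def pvGood (c : Char) : Bool :=
  PySem.Chars.isalpha c || pvValidchar.contains c || PySem.Chars.isspace c

/-- reference transformation: the footnoted text, structurally -/
def pvOut : List Char → Int → List Char
  | [], _ => []
  | c :: cs, k =>
      if c == '*' then ('(' :: PySem.Int.toChars (k + 1) ++ [')']) ++ pvOut cs (k + 1)
      else c :: pvOut cs k

/-- number of '*' seen -/
def pvStars (cs : List Char) : Int := cs.countP (· == '*')

/-- reference transformation as B builds it: one piece per input char -/
def pvPieces : List Char → Int → List (List Char)
  | [], _ => []
  | c :: cs, k =>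
      if c == '*' then ('(' :: PySem.Int.toChars (k + 1) ++ [')']) :: pvPieces cs (k + 1)
      else [c] :: pvPieces cs k

lemma pvPieces_flatten (cs : List Char) (k : Int) :
    (pvPieces cs k).flatten = pvOut cs k := by
  induction cs generalizing k with
  | nil => simp [pvPieces, pvOut]
  | cons c cs ih => by_cases h : c = '*' <;> simp [pvPieces, pvOut, h, ih]

lemma pvJoinNil (ps : List (List Char)) : PySem.Chars.join [] ps = ps.flatten := by
  induction ps with
  | nil => simp [PySem.Chars.join, List.intercalate]
  | cons p ps ih =>
      cases ps with
      | nil => simp [PySem.Chars.join, List.intercalate]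
      | cons q qs =>
          simp only [PySem.Chars.join, List.intercalate, List.intersperse] at ih ⊢
          simp_all

lemma pvA_count (cs : List Char) (k : Int) :
    cs.foldl
      (fun contador char =>
        if PySem.Chars.isalpha char || pvValidchar.contains char || PySem.Chars.isspace char
        then contador else contador + 1) k
      = k + ((cs.countP (fun c => !pvGood c) : Nat) : Int) := by
  induction cs generalizing k with
  | nil => simp
  | cons c cs ih =>
      simp only [List.foldl_cons]
      by_cases h : pvGood c = true
      · rw [if_pos (by simpa [pvGood] using h), ih]
        simp [List.countP_cons, h]
      · rw [if_neg (by simpa [pvGood] using h), ih]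
        simp only [List.countP_cons, Bool.not_eq_true] at *
        simp [h]
        omega

lemma pvA_loop (cs : List Char) (acc : List Char) (k : Int) :
    cs.foldl
      (fun st char =>
        if char == '*'
        then (st.1 ++ ('(' :: PySem.Int.toChars (st.2 + 1) ++ [')']), st.2 + 1)
        else (st.1 ++ [char], st.2)) (acc, k)
      = (acc ++ pvOut cs k, k + pvStars cs) := by
  induction cs generalizing acc k with
  | nil => simp [pvOut, pvStars]
  | cons c cs ih =>
      simp only [List.foldl_cons]
      by_cases h : (c == '*') = true
      · rw [if_pos h, ih]
        have h' : c = '*' := by simpa using h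
        simp [pvOut, h', pvStars, List.countP_cons, Prod.mk.injEq]
        omega
      · rw [if_neg h, ih]
        have h' : ¬ c = '*' := by simpa using h
        simp [pvOut, h', pvStars, List.countP_cons, Prod.mk.injEq]

lemma pvB_loop (cs : List Char) (v : Bool) (k : Int) (ps : List (List Char)) :
    cs.foldl
      (fun st ch =>
        let valid := if !(PySem.Chars.isalpha ch || pvB_valid.contains ch || PySem.Chars.isspace ch)
                     then false else st.1
        if ch == '*'
        then (valid, st.2.1 + 1, st.2.2 ++ [('(' :: PySem.Int.toChars (st.2.1 + 1) ++ [')'])])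
        else (valid, st.2.1, st.2.2 ++ [[ch]]))
      (v, k, ps)
      = (v && cs.all pvGood, k + pvStars cs, ps ++ pvPieces cs k) := by
  induction cs generalizing v k ps with
  | nil => simp [pvStars, pvPieces]
  | cons c cs ih =>
      simp only [List.foldl_cons, List.all_cons]
      have hvalid : pvB_valid = pvValidchar := rfl
      by_cases hg : pvGood c = true
      · have hg' : (PySem.Chars.isalpha c || pvB_valid.contains c || PySem.Chars.isspace c) = true := by
          simpa [pvGood, hvalid] using hg
        by_cases h : (c == '*') = true
        · have h' : c = '*' := by simpa using h
          rw [h'] at hg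
          simp only [hg', Bool.not_true, if_neg (by simp : ¬ (false = true))]
          rw [if_pos h, ih]
          simp [pvPieces, pvStars, h', hg, List.countP_cons, Prod.mk.injEq]
          omega
        · have h' : ¬ c = '*' := by simpa using h
          simp only [hg', Bool.not_true, if_neg (by simp : ¬ (false = true))]
          rw [if_neg h, ih]
          simp [pvPieces, pvStars, h', hg, List.countP_cons, Prod.mk.injEq]
      · have hg' : (PySem.Chars.isalpha c || pvB_valid.contains c || PySem.Chars.isspace c) = false := by
          simpa [pvGood, hvalid] using hg
        by_cases h : (c == '*') = true
        · have h' : c = '*' := by simpa using h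
          have hgf : pvGood c = false := by simpa using hg
          rw [h'] at hgf
          simp only [hg', Bool.not_false, if_pos rfl]
          rw [if_pos h, ih]
          simp [pvPieces, pvStars, h', hgf, List.countP_cons, Prod.mk.injEq]
          omega
        · have h' : ¬ c = '*' := by simpa using h
          simp only [hg', Bool.not_false, if_pos rfl]
          rw [if_neg h, ih]
          simp [pvPieces, pvStars, h', hg, List.countP_cons, Prod.mk.injEq]

lemma pvCount_all (cs : List Char) :
    (cs.countP (fun c => !pvGood c) = 0) ↔ cs.all pvGood = true := by
  rw [List.countP_eq_zero, List.all_eq_true]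
  simp

-- ===== VERDICT (by name: the statement is the Claim_ definition above) =====
theorem notas_al_pie_spec : Claim_equal_notas_al_pie := by
  intro s _
  show notas_al_pie s = notas_al_pie_alt s
  unfold notas_al_pie notas_al_pie_alt pvA_isCharGood pvA_notas
  rw [pvA_count, pvA_loop, pvB_loop]
  by_cases hall : s.toList.all pvGood = true
  · have hz : s.toList.countP (fun c => !pvGood c) = 0 := (pvCount_all s.toList).2 hall
    simp [hall, hz, pvJoinNil, pvPieces_flatten]
  · have hz : ¬ s.toList.countP (fun c => !pvGood c) = 0 := fun h => hall ((pvCount_all s.toList).1 h)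
    simp [hall, hz]
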